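-- pv_equiv track=rewrite | github.com/slavagarchenko/improved-rotary-phone | practice_12.py | align_line
-- ===== SOURCE A (Python) =====
-- def align_line(words, width):
--     if len(words) == 1:
--         return words[0].ljust(width)
--
--     total_chars = sum(len(word) for word in words)
--     spaces_needed = width - total_chars
--     gaps = len(words) - 1
--     space_between = spaces_needed // gaps
--     extra_spaces = spaces_needed % gaps
--
--     line = ""
--     for i, word in enumerate(words[:-1]):
--         line += word + " " * (space_between + (1 if i < extra_spaces else 0))
--     line += words[-1]
--     return line
-- ===== SOURCE B (Python) =====
-- def align_line(words, width):
--     if len(words) == 1: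
--         return words[0].ljust(width)
--     gaps = len(words) - 1
--     gap_sizes = [0] * gaps
--     for k in range(width - sum(len(w) for w in words)):
--         gap_sizes[k % gaps] += 1
--     parts = []
--     for word, gap in zip(words, gap_sizes):
--         parts.append(word)
--         parts.append(" " * gap)
--     parts.append(words[-1])
--     return "".join(parts)
-- ===== Notes on version B (the rewrite author's own statement) =====
-- stated objective: alternative
-- what changed: Replaces A's divmod arithmetic (base gap width + conditional extra for the leftmost gaps, computed inline while string-concatenating) by a two-phase table build: a gap-size array filled by distributing the needed spaces one at a time round-robin (gap_sizes[k % gaps] += 1), then a second pass emitting word/gap parts into a list joined once.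
import Mathlib
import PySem

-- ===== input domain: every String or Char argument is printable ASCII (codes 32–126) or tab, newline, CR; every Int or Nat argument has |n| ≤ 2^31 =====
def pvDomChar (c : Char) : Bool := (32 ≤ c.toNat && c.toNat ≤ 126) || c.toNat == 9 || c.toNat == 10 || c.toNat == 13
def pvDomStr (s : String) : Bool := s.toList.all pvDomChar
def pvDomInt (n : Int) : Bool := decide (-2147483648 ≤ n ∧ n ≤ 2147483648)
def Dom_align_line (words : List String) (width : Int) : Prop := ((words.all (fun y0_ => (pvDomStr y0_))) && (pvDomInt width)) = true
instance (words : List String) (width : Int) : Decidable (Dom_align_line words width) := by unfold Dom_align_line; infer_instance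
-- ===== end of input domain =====

-- B builds the layout in two phases — a gap-size table filled by round-robin distribution of the
-- needed spaces, then a parts list joined once — instead of A's inline divmod while concatenating;
-- same output (alternative decomposition, no speed claim).

-- ===== PORT A =====
-- strings are handled on the List Char side (PySem convention); " " * n is PySem.List.pyRepeat [' '] n
def align_line (words : List String) (width : Int) : String :=
  if words.length = 1 then
    -- words[0].ljust(width) = words[0] + " " * (width - len(words[0]))
    let w := ((PySem.List.pyGet? words 0).getD "").toList
    String.mk (w ++ PySem.List.pyRepeat [' '] (width - (w.length : Int)))
  else
    let total_chars : Int := (words.map (fun w => PySem.Str.len w)).sum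
    let spaces_needed : Int := width - total_chars
    let gaps : Int := (words.length : Int) - 1
    let space_between : Int := PySem.Int.floordiv spaces_needed gaps
    let extra_spaces : Int := PySem.Int.mod spaces_needed gaps
    let line : List Char :=
      (PySem.List.enumerate (PySem.List.slice words none (some (-1)))).foldl
        (fun line iw =>
          line ++ (iw.2.toList ++ PySem.List.pyRepeat [' ']
            (space_between + (if iw.1 < extra_spaces then 1 else 0))))
        []
    -- words[-1]: none exactly when words = [] (IndexError, excluded by Pre_)
    String.mk (line ++ ((PySem.List.pyGet? words (-1)).getD "").toList)

-- ===== PORT B =====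
def align_line_alt (words : List String) (width : Int) : String :=
  if words.length = 1 then
    let w := ((PySem.List.pyGet? words 0).getD "").toList
    String.mk (w ++ PySem.List.pyRepeat [' '] (width - (w.length : Int)))
  else
    let gaps : Int := (words.length : Int) - 1
    -- gap_sizes[k % gaps] += 1: k % gaps is nonnegative and < gaps, so List.set/getD at its toNat is exact
    let gap_sizes : List Int :=
      (PySem.List.pyRange 0 (width - (words.map (fun w => PySem.Str.len w)).sum) 1).foldl
        (fun gs k => gs.set (PySem.Int.mod k gaps).toNat (gs.getD (PySem.Int.mod k gaps).toNat 0 + 1))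
        (List.replicate (words.length - 1) (0 : Int))
    let parts : List (List Char) :=
      (words.zip gap_sizes).foldl
        (fun ps wg => ps ++ [wg.1.toList, PySem.List.pyRepeat [' '] wg.2]) []
    -- words[-1]: none exactly when words = [] (IndexError, excluded by Pre_)
    String.mk ((parts ++ [((PySem.List.pyGet? words (-1)).getD "").toList]).flatten)

-- ===== PRECONDITION & SPEC =====
-- Pre_ excludes only words = [], on which A raises IndexError at words[-1].
def Pre_align_line (words : List String) (width : Int) : Prop := words ≠ []
instance (words : List String) (width : Int) : Decidable (Pre_align_line words width) := by unfold Pre_align_line; infer_instance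
def pvWitness_align_line : List String × Int := (["hi", "there"], 12)

def Spec_align_line (words : List String) (width : Int) (out : String) : Prop := out = align_line_alt words width
instance (words : List String) (width : Int) (out : String) : Decidable (Spec_align_line words width out) := by unfold Spec_align_line; infer_instance

-- ===== CLAIM (what is proved, stated in full; the proofs are below) =====
def Claim_equal_align_line : Prop := ∀ (words : List String) (width : Int), Dom_align_line words width → Pre_align_line words width → Spec_align_line words width (align_line words width)

-- ===== LEMMAS AND PROOFS =====

-- the value gap j holds after round-robin distribution of n spaces over g' gaps
def rrCnt (g' n j : Nat) : Int := ((n / g' : Nat) : Int) + (if j < n % g' then 1 else 0)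

-- one round-robin increment, on the table viewed as a map over range
lemma set_map_range (g' r : Nat) (hr : r < g') (f : Nat → Int) :
    (((List.range g').map f).set r ((((List.range g').map f).getD r 0) + 1))
      = (List.range g').map (fun j => f j + if j = r then 1 else 0) := by
  apply List.ext_getElem
  · simp
  · intro i h1 h2
    rw [List.getElem_set]
    simp only [List.getElem_map, List.getElem_range]
    rcases eq_or_ne r i with h | h
    · subst h
      simp [List.getD_eq_getElem?_getD, List.getElem?_range, hr]
    · simp [h, h.symm]

-- adding the (n+1)-st space (which lands in gap n % g') steps the count formula
lemma rrCnt_step (g' n j : Nat) (hg : 0 < g') (hj : j < g') :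
    rrCnt g' n j + (if j = n % g' then 1 else 0) = rrCnt g' (n + 1) j := by
  unfold rrCnt
  have hdm : g' * (n / g') + n % g' = n := Nat.div_add_mod n g'
  have hr : n % g' < g' := Nat.mod_lt n hg
  by_cases h : n % g' + 1 = g'
  · have e : n + 1 = g' * (n / g' + 1) := by rw [Nat.mul_add, Nat.mul_one]; omega
    have hdiv : (n + 1) / g' = n / g' + 1 := by rw [e, Nat.mul_div_cancel_left _ hg]
    have hmod : (n + 1) % g' = 0 := by rw [e, Nat.mul_mod_right]
    rw [hdiv, hmod]
    split_ifs <;> push_cast <;> omega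
  · have e : n + 1 = g' * (n / g') + (n % g' + 1) := by omega
    have hdiv : (n + 1) / g' = n / g' := by
      have h2 : (n % g' + 1) / g' = 0 := Nat.div_eq_of_lt (by omega)
      calc (n + 1) / g' = (g' * (n / g') + (n % g' + 1)) / g' := by rw [← e]
        _ = n / g' + (n % g' + 1) / g' := Nat.mul_add_div hg _ _
        _ = n / g' := by rw [h2]; omega
    have hmod : (n + 1) % g' = n % g' + 1 := by
      have h2 : (n % g' + 1) % g' = n % g' + 1 := Nat.mod_eq_of_lt (by omega)
      calc (n + 1) % g' = (g' * (n / g') + (n % g' + 1)) % g' := by rw [← e]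
        _ = (n % g' + 1) % g' := Nat.mul_add_mod _ _ _
        _ = n % g' + 1 := h2
    rw [hdiv, hmod]
    split_ifs <;> push_cast <;> omega

-- the round-robin loop of B computes rrCnt in every gap
lemma rr_spec (g' : Nat) (hg : 0 < g') (n : Nat) :
    (PySem.List.pyRange 0 (n : Int) 1).foldl
      (fun gs k => gs.set (PySem.Int.mod k (g' : Int)).toNat
        (gs.getD (PySem.Int.mod k (g' : Int)).toNat 0 + 1))
      (List.replicate g' (0 : Int))
      = (List.range g').map (rrCnt g' n) := by
  induction n with
  | zero =>
      rw [PySem.List.pyRange_one_eq_nil (by simp)]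
      simp only [List.foldl_nil]
      have h0 : rrCnt g' 0 = fun _ => (0 : Int) := by
        funext j; simp [rrCnt]
      rw [h0]
      simp
  | succ n ih =>
      have hcast : ((n + 1 : Nat) : Int) = (n : Int) + 1 := by push_cast; ring
      rw [hcast, PySem.List.pyRange_one_succ_right (by positivity), List.foldl_append, ih]
      simp only [List.foldl]
      rw [PySem.Int.mod_natCast, Int.toNat_natCast,
          set_map_range g' (n % g') (Nat.mod_lt n hg) (rrCnt g' n)]
      apply List.map_congr_left
      intro j hj
      exact rrCnt_step g' n j hg (List.mem_range.mp hj)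

-- flattening a parts list that holds word/gap chunk pairs
lemma flatten_flatMap_pair {α β : Type} (l : List α) (f h : α → List β) :
    (l.flatMap (fun x => [f x, h x])).flatten = l.flatMap (fun x => f x ++ h x) := by
  induction l with
  | nil => simp
  | cons a t ih => simp [ih]

-- A's per-gap width and B's round-robin count produce the same run of spaces
lemma rep_width_eq (s : Int) (g' j : Nat) (hg : 0 < g') :
    PySem.List.pyRepeat [' '] (PySem.Int.floordiv s (g' : Int)
        + (if (j : Int) < PySem.Int.mod s (g' : Int) then 1 else 0))
      = PySem.List.pyRepeat [' ']
          (if 0 ≤ s then rrCnt g' s.toNat j else 0) := by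
  rw [PySem.List.pyRepeat_singleton, PySem.List.pyRepeat_singleton]
  congr 1
  by_cases hs : 0 ≤ s
  · obtain ⟨n, rfl⟩ := Int.eq_ofNat_of_zero_le hs
    rw [PySem.Int.floordiv_natCast, PySem.Int.mod_natCast, if_pos hs]
    unfold rrCnt
    rw [Int.toNat_natCast]
    by_cases h : j < n % g'
    · rw [if_pos h, if_pos (show (j : Int) < ((n % g' : Nat) : Int) by exact_mod_cast h)]
    · rw [if_neg h, if_neg (show ¬ (j : Int) < ((n % g' : Nat) : Int) by exact_mod_cast h)]
  · -- negative slack: A's per-gap width is ≤ 0, so both runs are empty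
    have hfd : PySem.Int.floordiv s (g' : Int) < 0 := by
      rw [PySem.Int.floordiv_lt_iff_lt_mul (by exact_mod_cast hg)]
      simpa using lt_of_not_ge hs
    rw [if_neg hs]
    by_cases h : (j : Int) < PySem.Int.mod s (g' : Int)
    · rw [if_pos h]; omega
    · rw [if_neg h]; omega

-- ===== VERDICT (by name: the statement is the Claim_ definition above) =====
theorem align_line_spec : Claim_equal_align_line := by
  intro words width _hdom hpre
  unfold Spec_align_line
  by_cases h1 : words.length = 1
  · simp [align_line, align_line_alt, h1]
  · simp only [align_line, align_line_alt, if_neg h1]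
    have hne : words ≠ [] := hpre
    have hlw : 2 ≤ words.length := by
      rcases words with _ | ⟨a, _ | _⟩ <;> simp_all
    set g' : Nat := words.length - 1 with hg'
    have hg : 0 < g' := by omega
    have hgaps : (words.length : Int) - 1 = (g' : Int) := by omega
    set s : Int := width - (words.map (fun w => PySem.Str.len w)).sum with hs
    rw [hgaps]
    -- B's round-robin table computes rrCnt (or stays all-zero for negative slack)
    have hgs : (PySem.List.pyRange 0 s 1).foldl
        (fun gs k => gs.set (PySem.Int.mod k (g' : Int)).toNat
          (gs.getD (PySem.Int.mod k (g' : Int)).toNat 0 + 1))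
        (List.replicate g' (0 : Int))
        = (List.range g').map (fun j => if 0 ≤ s then rrCnt g' s.toNat j else 0) := by
      by_cases hss : 0 ≤ s
      · rw [← Int.toNat_of_nonneg hss, rr_spec g' hg s.toNat]
        exact List.map_congr_left (fun j _ => by simp [hss])
      · rw [PySem.List.pyRange_one_eq_nil (by omega)]
        simp only [List.foldl_nil]
        rw [show (List.replicate g' (0 : Int)) = (List.range g').map (fun _ => (0:Int)) by
          simp [List.map_const']]
        exact List.map_congr_left (fun j _ => by simp [hss])
    rw [hgs]
    congr 1
    rw [PySem.List.foldl_append_eq_flatMap, List.nil_append,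
        PySem.List.foldl_append_eq_flatMap, List.nil_append,
        List.flatten_append, flatten_flatMap_pair]
    simp only [List.flatten_cons, List.flatten_nil, List.append_nil]
    congr 1
    -- chunk lists agree elementwise
    rw [PySem.List.slice_to_neg_one,
        PySem.List.enumerate_eq_map_pyRange words.dropLast "",
        List.flatMap_def, List.flatMap_def, List.map_map]
    apply congrArg List.flatten
    have hlen : words.dropLast.length = g' := by simp [hg']
    have hlenI : PySem.List.len words.dropLast = ((g' : Nat) : Int) := by
      simp [hlen]
    rw [hlenI, PySem.List.pyRange_zero_nat, List.map_map]
    apply List.ext_getElem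
    · simp only [List.length_map, List.length_range, List.length_zip]
      omega
    · intro i hi1 hi2
      have hig : i < g' := by simpa using hi1
      simp only [List.getElem_map, List.getElem_zip, List.getElem_range, Function.comp]
      have hid : i < words.dropLast.length := by omega
      have hget : PySem.List.pyGetD words.dropLast ((i : Nat) : Int) "" = words.dropLast[i] := by
        rw [PySem.List.pyGetD_natCast]
        exact List.getD_eq_getElem _ _ hid
      rw [hget, List.getElem_dropLast]
      congr 1
      exact rep_width_eq s g' i hg
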